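-- pv_equiv track=rewrite | github.com/Vishwa-Shah11/PracticeProblems | survival.py | survival
-- ===== SOURCE A (Python) =====
-- def survival(T):
--     """
--     Determine if the organism will survive or not
--
--     Argument:
--         T: integer
--     Return:
--         result: bool
--     """
--     for i in range(6):
--         x = i
--         for j in range(6):
--             y = j
--             f = 30 + x**2 + y**2 - 3*x - 4*y
--             if (f <= T):
--                 return True
--                 break
--
--     return False
-- ===== SOURCE B (Python) =====
-- def survival(T):
--     # f(x,y) = 30 + (x^2-3x) + (y^2-4y) is separable, and the domain is a
--     # product grid, so min over the grid = 30 + min_x + min_y: two 1-D scans.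
--     mx = min(x * x - 3 * x for x in range(6))
--     my = min(y * y - 4 * y for y in range(6))
--     return 30 + mx + my <= T
-- ===== Notes on version B (the rewrite author's own statement) =====
-- stated objective: alternative
-- what changed: Replaces A's early-exit two-dimensional search over every grid cell with a separable minimization: f splits into independent x and y terms over a product grid, so B minimizes each one-dimensional term separately and compares the combined minimum with T once.
import Mathlib
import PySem

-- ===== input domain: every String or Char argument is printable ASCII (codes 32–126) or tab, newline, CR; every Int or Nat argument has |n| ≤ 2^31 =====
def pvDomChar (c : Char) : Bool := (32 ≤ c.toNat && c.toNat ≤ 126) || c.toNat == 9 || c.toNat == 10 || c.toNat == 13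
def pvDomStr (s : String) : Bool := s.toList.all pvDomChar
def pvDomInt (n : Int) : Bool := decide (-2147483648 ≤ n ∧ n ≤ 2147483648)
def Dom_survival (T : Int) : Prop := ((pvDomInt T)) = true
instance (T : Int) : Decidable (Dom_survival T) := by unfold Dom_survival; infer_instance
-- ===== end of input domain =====

-- B replaces A's early-exit 2-D grid search with a separable minimization: min over each 1-D factor, then one comparison (alternative decomposition; same cost class).


-- ===== PORT A =====
-- A: nested for-loops over the 6x6 grid with early return True on the first value ≤ T; .any short-circuits left-to-right like the loop.
def survival (T : Int) : Bool :=
  (PySem.List.pyRange 0 6 1).any (fun i =>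
    let x := i
    (PySem.List.pyRange 0 6 1).any (fun j =>
      let y := j
      let f := 30 + x ^ 2 + y ^ 2 - 3 * x - 4 * y
      decide (f ≤ T)))

-- ===== PORT B =====
-- B: separable minimization — min of the x-term and min of the y-term over range(6) independently, then one comparison.
def survival_alt (T : Int) : Bool :=
  let mx := PySem.List.min? ((PySem.List.pyRange 0 6 1).map (fun x => x * x - 3 * x)) (fun v => v)
  let my := PySem.List.min? ((PySem.List.pyRange 0 6 1).map (fun y => y * y - 4 * y)) (fun v => v)
  match mx, my with
  | some a, some b => decide (30 + a + b ≤ T)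
  | _, _ => false

-- ===== PRECONDITION & SPEC =====
def Spec_survival (T : Int) (out : Bool) : Prop := out = survival_alt T
instance (T : Int) (out : Bool) : Decidable (Spec_survival T out) := by unfold Spec_survival; infer_instance

-- ===== CLAIM (what is proved, stated in full; the proofs are below) =====
def Claim_equal_survival : Prop := ∀ (T : Int), Dom_survival T → Spec_survival T (survival T)

-- ===== LEMMAS AND PROOFS =====

-- ===== VERDICT (by name: the statement is the Claim_ definition above) =====
theorem survival_spec : Claim_equal_survival := by
  intro T _
  unfold Spec_survival survival survival_alt
  simp [PySem.List.pyRange, PySem.List.min?, List.range_succ]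
  by_cases h : (24 : Int) ≤ T <;> simp [h] <;> omega
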